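-- pv_equiv track=rewrite | github.com/LorenzDettmann/SOM2CG | martini-som.py | ring_bonding
-- ===== SOURCE A (Python) =====
-- import math
--
-- def ring_bonding(real, dihedrals):
--     """
--     Imported and modified from the cg_param_m3.py script
--     """
--     # Construct inner frame and hinge dihedrals
--     n_struts = len(real) - 3
--     j = len(real) - 1
--     k = 1
--     struts = 0
--     for s in range(int(math.ceil(n_struts / 2.0))):
--         struts += 1
--         i = (j + 1) % len(real)  # First one loops round to 0
--         l = k + 1
--         dihedrals.append([real[i], real[j], real[k], real[l]])
--         k += 1
--         if struts == n_struts: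
--             break
--         struts += 1
--         i = k - 1
--         l = j - 1
--         dihedrals.append([real[i], real[j], real[k], real[l]])
--         j -= 1
--
--     return dihedrals
-- ===== SOURCE B (Python) =====
-- def ring_bonding(real, dihedrals):
--     # Closed-form indices per strut m instead of A's mutated j/k counters and mid-loop break.
--     n = len(real)
--     for m in range(n - 3):
--         k = 1 + (m + 1) // 2
--         j = (n - 1) - m // 2
--         if m % 2 == 0:
--             dihedrals.append([real[(j + 1) % n], real[j], real[k], real[k + 1]])
--         else:
--             dihedrals.append([real[k - 1], real[j], real[k], real[j - 1]])
--     return dihedrals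
-- ===== Notes on version B (the rewrite author's own statement) =====
-- stated objective: simpler
-- what changed: Replaces A's half-count loop with mutated j/k/struts counters, two append blocks and a mid-loop break by a single uniform pass over range(len(real)-3) that derives both indices in closed form (k = 1+(m+1)//2, j = len(real)-1-m//2) and picks the dihedral shape by the parity of m.
import Mathlib
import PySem

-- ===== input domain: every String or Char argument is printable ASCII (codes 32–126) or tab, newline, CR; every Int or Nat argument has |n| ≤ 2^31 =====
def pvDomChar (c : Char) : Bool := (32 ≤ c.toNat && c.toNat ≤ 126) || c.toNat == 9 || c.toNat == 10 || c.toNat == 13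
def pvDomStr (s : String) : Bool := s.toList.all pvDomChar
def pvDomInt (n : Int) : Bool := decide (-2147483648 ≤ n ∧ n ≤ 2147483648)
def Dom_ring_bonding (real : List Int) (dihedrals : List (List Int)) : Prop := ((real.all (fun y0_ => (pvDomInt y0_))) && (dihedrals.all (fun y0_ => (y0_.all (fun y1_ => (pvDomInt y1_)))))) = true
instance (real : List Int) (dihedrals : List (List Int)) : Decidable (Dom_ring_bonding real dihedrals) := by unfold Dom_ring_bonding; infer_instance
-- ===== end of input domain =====

-- B replaces A's mutated j/k/struts counters, alternating append blocks and mid-loop break by one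
-- uniform pass with closed-form indices per strut (objective: simpler).  Both Pythons append to the
-- `dihedrals` argument in place; the theorems here are about the RETURN value (B performs the same mutation).

-- ===== PORT A =====
-- real[i]: indices reached by A's loop are always in range, so the `.getD 0` default is never used.
def pvG (real : List Int) (i : Int) : Int := (PySem.List.pyGet? real i).getD 0

-- the `for s in range(...)` loop with state (j, k, struts, dihedrals) and the mid-loop break;
-- temporaries i, l, struts, k are written inline at their single use sites
def pvLoopA (real : List Int) (nstruts : Int) : Nat → Int → Int → Int → List (List Int) → List (List Int)
  | 0, _, _, _, acc => acc
  | s+1, j, k, struts, acc =>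
    -- struts += 1; i = (j+1) % len(real); l = k+1; dihedrals.append(...); k += 1
    if struts + 1 = nstruts then  -- if struts == n_struts: break
      acc ++ [[pvG real (PySem.Int.mod (j + 1) (real.length : Int)), pvG real j, pvG real k, pvG real (k + 1)]]
    else
      -- struts += 1; i = k-1; l = j-1; dihedrals.append(...); j -= 1
      pvLoopA real nstruts s (j - 1) (k + 1) (struts + 1 + 1)
        ((acc ++ [[pvG real (PySem.Int.mod (j + 1) (real.length : Int)), pvG real j, pvG real k, pvG real (k + 1)]])
          ++ [[pvG real (k + 1 - 1), pvG real j, pvG real (k + 1), pvG real (j - 1)]])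

def ring_bonding (real : List Int) (dihedrals : List (List Int)) : List (List Int) :=
  -- n_struts = len(real) - 3;  range(int(math.ceil(n_struts/2.0))) has
  -- (n_struts + 1) // 2 iterations (exact: |n_struts| ≤ 2^31 is float-exact);  j = len(real)-1, k = 1, struts = 0
  pvLoopA real ((real.length : Int) - 3)
    (PySem.Int.floordiv (((real.length : Int) - 3) + 1) 2).toNat
    ((real.length : Int) - 1) 1 0 dihedrals

-- ===== PORT B =====
def ring_bonding_alt (real : List Int) (dihedrals : List (List Int)) : List (List Int) :=
  (PySem.List.pyRange 0 ((real.length : Int) - 3) 1).foldl (fun acc m =>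
    -- k = 1 + (m+1)//2; j = (len(real)-1) - m//2
    if PySem.Int.mod m 2 = 0 then
      acc ++ [[pvG real (PySem.Int.mod (((real.length : Int) - 1) - PySem.Int.floordiv m 2 + 1) (real.length : Int)),
               pvG real (((real.length : Int) - 1) - PySem.Int.floordiv m 2),
               pvG real (1 + PySem.Int.floordiv (m + 1) 2),
               pvG real (1 + PySem.Int.floordiv (m + 1) 2 + 1)]]
    else
      acc ++ [[pvG real (1 + PySem.Int.floordiv (m + 1) 2 - 1),
               pvG real (((real.length : Int) - 1) - PySem.Int.floordiv m 2),
               pvG real (1 + PySem.Int.floordiv (m + 1) 2),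
               pvG real (((real.length : Int) - 1) - PySem.Int.floordiv m 2 - 1)]]) dihedrals

-- ===== PRECONDITION & SPEC =====
def Spec_ring_bonding (real : List Int) (dihedrals : List (List Int)) (out : List (List Int)) : Prop := out = ring_bonding_alt real dihedrals
instance (real : List Int) (dihedrals : List (List Int)) (out : List (List Int)) : Decidable (Spec_ring_bonding real dihedrals out) := by unfold Spec_ring_bonding; infer_instance

-- ===== CLAIM (what is proved, stated in full; the proofs are below) =====
def Claim_equal_ring_bonding : Prop := ∀ (real : List Int) (dihedrals : List (List Int)), Dom_ring_bonding real dihedrals → Spec_ring_bonding real dihedrals (ring_bonding real dihedrals)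

-- ===== LEMMAS AND PROOFS =====

-- the dihedral appended for strut number m (0-based): common characterisation of both loops
def pvE (real : List Int) (m : Nat) : List Int :=
  if m % 2 = 0 then
    [pvG real (PySem.Int.mod ((real.length : Int) - 1 - ((m / 2 : Nat) : Int) + 1) (real.length : Int)),
     pvG real ((real.length : Int) - 1 - ((m / 2 : Nat) : Int)),
     pvG real (1 + (((m + 1) / 2 : Nat) : Int)),
     pvG real (1 + (((m + 1) / 2 : Nat) : Int) + 1)]
  else
    [pvG real (1 + (((m + 1) / 2 : Nat) : Int) - 1),
     pvG real ((real.length : Int) - 1 - ((m / 2 : Nat) : Int)),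
     pvG real (1 + (((m + 1) / 2 : Nat) : Int)),
     pvG real ((real.length : Int) - 1 - ((m / 2 : Nat) : Int) - 1)]

lemma pvE_range_shift (real : List Int) (t a : Nat) :
    (List.range (t + 2)).map (fun i => pvE real (a + i)) =
      pvE real a :: pvE real (a + 1) :: (List.range t).map (fun i => pvE real (a + 2 + i)) := by
  rw [List.range_succ_eq_map, List.range_succ_eq_map]
  simp only [List.map_cons, List.map_map, Function.comp_def, Nat.add_zero]
  refine congrArg _ (congrArg₂ _ rfl ?_)
  exact List.map_congr_left (fun i _ => congrArg (pvE real) (by omega))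

lemma pvLoopA_inv (real : List Int) (S : Nat) :
    ∀ (s p : Nat) (acc : List (List Int)), s + p = (S + 1) / 2 →
    pvLoopA real (S : Int) s ((real.length : Int) - 1 - p) (1 + p) (2 * p) acc
      = acc ++ (List.range (S - 2 * p)).map (fun i => pvE real (2 * p + i)) := by
  intro s
  induction s with
  | zero =>
    intro p acc h
    have h0 : S - 2 * p = 0 := by omega
    simp [pvLoopA, h0]
  | succ s ih =>
    intro p acc h
    have hlt : 2 * p < S := by omega
    have he0 : pvE real (2 * p) =
        [pvG real (PySem.Int.mod ((real.length : Int) - 1 - ↑p + 1) (real.length : Int)),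
         pvG real ((real.length : Int) - 1 - ↑p), pvG real (1 + ↑p), pvG real (1 + ↑p + 1)] := by
      have h1 : (2 * p + 1) / 2 = p := by omega
      have h2 : 2 * p / 2 = p := by omega
      simp [pvE, h1, h2, Nat.mul_mod_right]
    have he1 : pvE real (2 * p + 1) =
        [pvG real (1 + ↑p + 1 - 1), pvG real ((real.length : Int) - 1 - ↑p),
         pvG real (1 + ↑p + 1), pvG real ((real.length : Int) - 1 - ↑p - 1)] := by
      have h1 : (2 * p + 1 + 1) / 2 = p + 1 := by omega
      have h2 : (2 * p + 1) / 2 = p := by omega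
      have h3 : (2 * p + 1) % 2 = 1 := by omega
      simp [pvE, h1, h2, h3]
      exact ⟨congrArg _ (by ring), congrArg _ (by ring)⟩
    rw [pvLoopA]
    by_cases hb : (2 * (p : Int) + 1) = (S : Int)
    · have hS : S = 2 * p + 1 := by exact_mod_cast hb.symm
      have hrem : S - 2 * p = 1 := by omega
      rw [if_pos hb, hrem]
      simp only [List.range_one, List.map, Nat.add_zero, he0]
    · rw [if_neg hb]
      have ih' : ∀ acc' : List (List Int),
          pvLoopA real (S : Int) s ((real.length : Int) - 1 - ↑p - 1) (1 + ↑p + 1) (2 * ↑p + 1 + 1) acc'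
            = acc' ++ (List.range (S - 2 * (p + 1))).map (fun i => pvE real (2 * (p + 1) + i)) := by
        intro acc'
        have a1 : (real.length : Int) - 1 - ↑p - 1 = (real.length : Int) - 1 - ↑(p + 1) := by push_cast; ring
        have a2 : (1 : Int) + ↑p + 1 = 1 + ↑(p + 1) := by push_cast; ring
        have a3 : (2 : Int) * ↑p + 1 + 1 = 2 * ↑(p + 1) := by push_cast; ring
        rw [a1, a2, a3]
        exact ih (p + 1) acc' (by omega)
      rw [ih']
      have hrem : S - 2 * p = (S - 2 * (p + 1)) + 2 := by omega
      rw [hrem, pvE_range_shift real (S - 2 * (p + 1)) (2 * p), he0, he1]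
      simp only [List.append_assoc, List.cons_append, List.nil_append]
      refine congrArg _ (congrArg _ (congrArg _ ?_))
      exact List.map_congr_left (fun i _ => congrArg (pvE real) (by omega))

lemma ring_bonding_eq_map (real : List Int) (dihedrals : List (List Int)) :
    ring_bonding real dihedrals
      = dihedrals ++ (List.range ((real.length : Int) - 3).toNat).map (pvE real) := by
  unfold ring_bonding
  by_cases h3 : 3 ≤ real.length
  · have hS : (real.length : Int) - 3 = ((real.length - 3 : Nat) : Int) := by omega
    have hfuel : (PySem.Int.floordiv (((real.length : Int) - 3) + 1) 2).toNat = ((real.length - 3) + 1) / 2 := by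
      rw [PySem.Int.floordiv_eq_ediv_of_pos (by norm_num)]
      omega
    rw [hfuel, hS]
    have h0 := pvLoopA_inv real (real.length - 3) (((real.length - 3) + 1) / 2) 0 dihedrals (by omega)
    simp only [Nat.cast_zero, Nat.mul_zero, mul_zero, Nat.sub_zero, sub_zero, add_zero, zero_add] at h0
    rw [h0]
    have ht : (((real.length - 3 : Nat) : Int)).toNat = real.length - 3 := by omega
    rw [ht]
  · have hfuel : (PySem.Int.floordiv (((real.length : Int) - 3) + 1) 2).toNat = 0 := by
      rw [PySem.Int.floordiv_eq_ediv_of_pos (by norm_num)]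
      omega
    have ht : ((real.length : Int) - 3).toNat = 0 := by omega
    rw [hfuel, ht]
    simp [pvLoopA]

lemma ring_bonding_alt_eq_map (real : List Int) (dihedrals : List (List Int)) :
    ring_bonding_alt real dihedrals
      = dihedrals ++ (List.range ((real.length : Int) - 3).toNat).map (pvE real) := by
  unfold ring_bonding_alt
  rw [PySem.List.pyRange_one, List.foldl_map]
  rw [show ((real.length : Int) - 3 - 0) = (real.length : Int) - 3 by ring]
  induction (List.range ((real.length : Int) - 3).toNat) generalizing dihedrals with
  | nil => simp
  | cons x xs ih =>
    simp only [List.foldl_cons, List.map_cons]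
    have hfd1 : PySem.Int.floordiv ((0 : Int) + (x : Int) + 1) 2 = (((x + 1) / 2 : Nat) : Int) := by
      rw [show ((0 : Int) + (x : Int) + 1) = ((x + 1 : Nat) : Int) by push_cast; ring]
      exact_mod_cast PySem.Int.floordiv_natCast (x + 1) 2
    have hfd2 : PySem.Int.floordiv ((0 : Int) + (x : Int)) 2 = ((x / 2 : Nat) : Int) := by
      rw [show ((0 : Int) + (x : Int)) = ((x : Nat) : Int) by ring]
      exact_mod_cast PySem.Int.floordiv_natCast x 2
    have hmod : PySem.Int.mod ((0 : Int) + (x : Int)) 2 = ((x % 2 : Nat) : Int) := by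
      rw [show ((0 : Int) + (x : Int)) = ((x : Nat) : Int) by ring]
      exact_mod_cast PySem.Int.mod_natCast x 2
    rw [hfd1, hfd2, hmod]
    have hbody : (if (((x % 2 : Nat) : Int)) = 0 then
          dihedrals ++ [[pvG real (PySem.Int.mod (((real.length : Int) - 1) - ((x / 2 : Nat) : Int) + 1) (real.length : Int)),
            pvG real (((real.length : Int) - 1) - ((x / 2 : Nat) : Int)),
            pvG real (1 + (((x + 1) / 2 : Nat) : Int)),
            pvG real (1 + (((x + 1) / 2 : Nat) : Int) + 1)]]
        else
          dihedrals ++ [[pvG real (1 + (((x + 1) / 2 : Nat) : Int) - 1),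
            pvG real (((real.length : Int) - 1) - ((x / 2 : Nat) : Int)),
            pvG real (1 + (((x + 1) / 2 : Nat) : Int)),
            pvG real (((real.length : Int) - 1) - ((x / 2 : Nat) : Int) - 1)]])
        = dihedrals ++ [pvE real x] := by
      by_cases hp : x % 2 = 0
      · rw [if_pos (by exact_mod_cast hp)]
        simp [pvE, hp]
      · rw [if_neg (by exact_mod_cast hp)]
        simp [pvE, hp]
    rw [hbody, ih]
    simp

-- ===== VERDICT (by name: the statement is the Claim_ definition above) =====
theorem ring_bonding_spec : Claim_equal_ring_bonding := by
  intro real dihedrals _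
  unfold Spec_ring_bonding
  rw [ring_bonding_eq_map, ring_bonding_alt_eq_map]
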